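-- pv_equiv track=rewrite | github.com/infomuscle/algorithms-programmers | line-2020-python/line-2020-1.py | solution
-- ===== SOURCE A (Python) =====
-- def solution(inputString):
--     answer = -1
--     stack = []
--     openings = ["(", "{", "[", "<"]
--     closings = [")", "}", "]", ">"]
--     temp = []
--     count = 0
--
--     for s in inputString:
--         if s in openings:
--             stack.append(s)
--
--         if s in closings:
--             while len(stack) != 0:
--                 b = stack.pop()
--                 if openings.index(b) == closings.index(s):
--                     count += 1
--                     temp.reverse()
--                     for t in temp:
--                         stack.append(t)
--                     temp = []
--                     break
--                 else:
--                     temp.append(b)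
--             if len(temp) != 0:
--                 temp.reverse()
--                 for t in temp:
--                     stack.append(t)
--                 temp = []
--
--     if len(stack) == 0:
--         answer = count
--
--     return answer
-- ===== SOURCE B (Python) =====
-- def solution(inputString):
--     # Per-type counters of currently-open brackets; the multiset of open
--     # brackets is all that matters for matching, so no stack is needed.
--     a = b = c = d = 0  # open '(', '{', '[', '<'
--     matched = 0
--     for s in inputString:
--         if s == '(':
--             a += 1
--         elif s == '{':
--             b += 1
--         elif s == '[':
--             c += 1
--         elif s == '<':
--             d += 1
--         elif s == ')':
--             if a > 0:
--                 a -= 1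
--                 matched += 1
--         elif s == '}':
--             if b > 0:
--                 b -= 1
--                 matched += 1
--         elif s == ']':
--             if c > 0:
--                 c -= 1
--                 matched += 1
--         elif s == '>':
--             if d > 0:
--                 d -= 1
--                 matched += 1
--     return matched if a == 0 and b == 0 and c == 0 and d == 0 else -1
-- ===== Notes on version B (the rewrite author's own statement) =====
-- stated objective: alternative
-- what changed: Replaces the stack with its pop/search/restore inner loop by four per-bracket-type open counters updated in a single pass (the stack's content only matters as a multiset, since a closer matches any same-type opener anywhere in the stack).
import Mathlib
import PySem

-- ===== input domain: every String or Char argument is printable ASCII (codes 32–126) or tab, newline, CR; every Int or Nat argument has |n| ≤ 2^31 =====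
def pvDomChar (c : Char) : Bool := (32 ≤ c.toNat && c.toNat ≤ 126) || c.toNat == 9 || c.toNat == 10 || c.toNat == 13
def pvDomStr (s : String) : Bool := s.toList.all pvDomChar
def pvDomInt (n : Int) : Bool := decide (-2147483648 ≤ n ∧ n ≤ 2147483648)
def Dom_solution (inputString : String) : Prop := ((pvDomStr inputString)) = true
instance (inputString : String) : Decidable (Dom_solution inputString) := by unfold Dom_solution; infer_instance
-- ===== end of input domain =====

-- B replaces A's stack with its pop/search/restore inner loop by four per-bracket-type
-- open counters updated in one pass; equal return value proved below.

-- ===== PORT A =====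
def pvOpenings : List Char := ['(', '{', '[', '<']
def pvClosings : List Char := [')', '}', ']', '>']

-- the inner `while len(stack) != 0` loop of A: pops from the end into temp until a
-- same-type opening is found (then count += 1 and temp is restored) or the stack is exhausted
def pvInner (s : Char) (stack temp : List Char) (count : Int) : List Char × Int :=
  if hs : stack = [] then (temp.reverse, count)
  else
    let b := stack.getLast hs
    let rest := stack.dropLast
    if PySem.List.index? pvOpenings b = PySem.List.index? pvClosings s then
      (rest ++ temp.reverse, count + 1)
    else
      pvInner s rest (temp ++ [b]) count
termination_by stack.length
decreasing_by
  simp only [List.length_dropLast]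
  exact Nat.sub_lt (List.length_pos_of_ne_nil hs) Nat.one_pos

-- the `for s in inputString` loop of A, carrying (stack, count)
def pvLoopA : List Char → List Char → Int → List Char × Int
  | [], stack, count => (stack, count)
  | s :: rest, stack, count =>
    let stack1 := if pvOpenings.contains s then stack ++ [s] else stack
    if pvClosings.contains s then
      let r := pvInner s stack1 [] count
      pvLoopA rest r.1 r.2
    else
      pvLoopA rest stack1 count

def solution (inputString : String) : Int :=
  let r := pvLoopA inputString.toList [] 0
  if r.1.length = 0 then r.2 else -1

-- ===== PORT B =====
-- state (a, b, c, d, m): open counters for '(' '{' '[' '<' and the matched-pair count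
def pvStepB (st : Int × Int × Int × Int × Int) (s : Char) : Int × Int × Int × Int × Int :=
  let (a, b, c, d, m) := st
  if s = '(' then (a + 1, b, c, d, m)
  else if s = '{' then (a, b + 1, c, d, m)
  else if s = '[' then (a, b, c + 1, d, m)
  else if s = '<' then (a, b, c, d + 1, m)
  else if s = ')' then (if a > 0 then (a - 1, b, c, d, m + 1) else st)
  else if s = '}' then (if b > 0 then (a, b - 1, c, d, m + 1) else st)
  else if s = ']' then (if c > 0 then (a, b, c - 1, d, m + 1) else st)
  else if s = '>' then (if d > 0 then (a, b, c, d - 1, m + 1) else st)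
  else st

def solution_alt (inputString : String) : Int :=
  let st := inputString.toList.foldl pvStepB (0, 0, 0, 0, 0)
  if st.1 = 0 ∧ st.2.1 = 0 ∧ st.2.2.1 = 0 ∧ st.2.2.2.1 = 0 then st.2.2.2.2 else -1

-- ===== PRECONDITION & SPEC =====
def Spec_solution (inputString : String) (out : Int) : Prop := out = solution_alt inputString
instance (inputString : String) (out : Int) : Decidable (Spec_solution inputString out) := by unfold Spec_solution; infer_instance

-- ===== CLAIM (what is proved, stated in full; the proofs are below) =====
def Claim_equal_solution : Prop := ∀ (inputString : String), Dom_solution inputString → Spec_solution inputString (solution inputString)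

-- ===== LEMMAS AND PROOFS =====

lemma pvInner_snoc (s : Char) (ys : List Char) (y : Char) (temp : List Char) (count : Int) :
    pvInner s (ys ++ [y]) temp count =
      if PySem.List.index? pvOpenings y = PySem.List.index? pvClosings s
      then (ys ++ temp.reverse, count + 1)
      else pvInner s ys (temp ++ [y]) count := by
  rw [pvInner]; simp

-- characterisation of A's inner loop by counts: if the matching opener o occurs in the
-- stack, one occurrence of o is removed and count increments; otherwise nothing changes
lemma pvInner_spec (s o : Char)
    (Hm : ∀ b ∈ pvOpenings, ((PySem.List.index? pvOpenings b = PySem.List.index? pvClosings s) ↔ b = o)) :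
    ∀ (stack temp : List Char) (count : Int),
      (∀ x ∈ stack, x ∈ pvOpenings) → (∀ x ∈ temp, x ∈ pvOpenings) → o ∉ temp →
      (∀ x ∈ (pvInner s stack temp count).1, x ∈ pvOpenings) ∧
      (∀ c : Char, (pvInner s stack temp count).1.count c
          + (if c = o ∧ o ∈ stack then 1 else 0) = stack.count c + temp.count c) ∧
      (pvInner s stack temp count).2 = count + (if o ∈ stack then 1 else 0) := by
  intro stack
  induction stack using List.reverseRecOn with
  | nil =>
    intro temp count _ Ht _
    rw [pvInner]
    refine ⟨by simpa using Ht, ?_, by simp⟩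
    intro c; simp
  | append_singleton ys y ih =>
    intro temp count Hs Ht Hot
    have hy : y ∈ pvOpenings := Hs y (by simp)
    have hys : ∀ x ∈ ys, x ∈ pvOpenings := fun x hx => Hs x (by simp [hx])
    rw [pvInner_snoc]
    by_cases hyo : y = o
    · subst hyo
      rw [if_pos ((Hm y hy).mpr rfl)]
      refine ⟨?_, ?_, by simp⟩
      · intro x hx
        rcases List.mem_append.1 hx with h | h
        · exact hys x h
        · exact Ht x (List.mem_reverse.1 h)
      · intro c
        by_cases hc : c = y
        · subst hc
          simp [List.count_append]
          omega
        · simp [List.count_append, List.count_cons, hc]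
          exact fun h => hc h.symm
    · rw [if_neg (fun h => hyo ((Hm y hy).1 h))]
      have Ht' : ∀ x ∈ temp ++ [y], x ∈ pvOpenings := by
        intro x hx
        rcases List.mem_append.1 hx with h | h
        · exact Ht x h
        · simp at h; subst h; exact hy
      have Hot' : o ∉ temp ++ [y] := by
        simp [Hot]
        exact fun h => hyo h.symm
      obtain ⟨h1, h2, h3⟩ := ih (temp ++ [y]) count hys Ht' Hot'
      have hmem : o ∈ ys ++ [y] ↔ o ∈ ys := by
        simp
        intro h; exact absurd h.symm hyo
      refine ⟨h1, ?_, by rw [h3]; simp [hmem]⟩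
      intro c
      have hh := h2 c
      by_cases hc : c = o
      · subst hc
        simp [List.count_append, List.count_cons, hmem] at hh ⊢
        omega
      · simp [List.count_append, hc] at hh ⊢
        omega

lemma countZ (stack : List Char) (x c : Char) :
    ((stack ++ [x]).count c : Int) = (stack.count c : Int) + (if c = x then 1 else 0) := by
  simp [List.count_append, List.count_cons]
  split_ifs with h1 h2 <;> simp_all

-- the stack only ever holds opening brackets, so its length is the sum of the four counts
lemma length_eq_counts (stack : List Char) (H : ∀ x ∈ stack, x ∈ pvOpenings) :
    stack.length = stack.count '(' + stack.count '{' + stack.count '[' + stack.count '<' := by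
  induction stack with
  | nil => simp
  | cons x xs ih =>
    have hx : x ∈ pvOpenings := H x (by simp)
    have hxs := ih (fun y hy => H y (by simp [hy]))
    simp only [pvOpenings, List.mem_cons, List.not_mem_nil, or_false] at hx
    rcases hx with h | h | h | h <;> subst h <;>
      simp [hxs] <;> omega

-- the loop invariant: A's (stack, count) corresponds to B's counter state
def pvInv (stack : List Char) (count : Int) (st : Int × Int × Int × Int × Int) : Prop :=
  (∀ x ∈ stack, x ∈ pvOpenings) ∧
  (stack.count '(' : Int) = st.1 ∧ (stack.count '{' : Int) = st.2.1 ∧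
  (stack.count '[' : Int) = st.2.2.1 ∧ (stack.count '<' : Int) = st.2.2.2.1 ∧
  count = st.2.2.2.2

lemma pvLoop_inv : ∀ (l stack : List Char) (count : Int) (st : Int × Int × Int × Int × Int),
    pvInv stack count st →
    pvInv (pvLoopA l stack count).1 (pvLoopA l stack count).2 (l.foldl pvStepB st) := by
  intro l
  induction l with
  | nil => intro stack count st h; simpa [pvLoopA] using h
  | cons s rest ih =>
    intro stack count st h
    obtain ⟨Hs, h1, h2, h3, h4, h5⟩ := h
    obtain ⟨a, b, c, d, m⟩ := st
    simp only at h1 h2 h3 h4 h5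
    by_cases e1 : s = '('
    · subst e1
      rw [show pvLoopA ('(' :: rest) stack count = pvLoopA rest (stack ++ ['(']) count from by
        simp [pvLoopA, pvOpenings, pvClosings]]
      simp only [List.foldl_cons, pvStepB]
      apply ih
      refine ⟨?_, ?_, ?_, ?_, ?_, h5⟩
      · intro y hy
        rcases List.mem_append.1 hy with hm | hm
        · exact Hs y hm
        · simp at hm; subst hm; simp [pvOpenings]
      all_goals rw [countZ]; simp [h1, h2, h3, h4]
    by_cases e2 : s = '{'
    · subst e2
      rw [show pvLoopA ('{' :: rest) stack count = pvLoopA rest (stack ++ ['{']) count from by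
        simp [pvLoopA, pvOpenings, pvClosings]]
      rw [show List.foldl pvStepB (a, b, c, d, m) ('{' :: rest)
            = List.foldl pvStepB (a, b + 1, c, d, m) rest from by
        simp [pvStepB]]
      apply ih
      refine ⟨?_, ?_, ?_, ?_, ?_, h5⟩
      · intro y hy
        rcases List.mem_append.1 hy with hm | hm
        · exact Hs y hm
        · simp at hm; subst hm; simp [pvOpenings]
      all_goals rw [countZ]; simp [h1, h2, h3, h4]
    by_cases e3 : s = '['
    · subst e3
      rw [show pvLoopA ('[' :: rest) stack count = pvLoopA rest (stack ++ ['[']) count from by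
        simp [pvLoopA, pvOpenings, pvClosings]]
      rw [show List.foldl pvStepB (a, b, c, d, m) ('[' :: rest)
            = List.foldl pvStepB (a, b, c + 1, d, m) rest from by
        simp [pvStepB]]
      apply ih
      refine ⟨?_, ?_, ?_, ?_, ?_, h5⟩
      · intro y hy
        rcases List.mem_append.1 hy with hm | hm
        · exact Hs y hm
        · simp at hm; subst hm; simp [pvOpenings]
      all_goals rw [countZ]; simp [h1, h2, h3, h4]
    by_cases e4 : s = '<'
    · subst e4
      rw [show pvLoopA ('<' :: rest) stack count = pvLoopA rest (stack ++ ['<']) count from by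
        simp [pvLoopA, pvOpenings, pvClosings]]
      rw [show List.foldl pvStepB (a, b, c, d, m) ('<' :: rest)
            = List.foldl pvStepB (a, b, c, d + 1, m) rest from by
        simp [pvStepB]]
      apply ih
      refine ⟨?_, ?_, ?_, ?_, ?_, h5⟩
      · intro y hy
        rcases List.mem_append.1 hy with hm | hm
        · exact Hs y hm
        · simp at hm; subst hm; simp [pvOpenings]
      all_goals rw [countZ]; simp [h1, h2, h3, h4]
    by_cases e5 : s = ')'
    · subst e5
      rw [show pvLoopA (')' :: rest) stack count
            = pvLoopA rest (pvInner ')' stack [] count).1 (pvInner ')' stack [] count).2 from by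
        rw [pvLoopA]; simp [pvOpenings, pvClosings]]
      rw [show List.foldl pvStepB (a, b, c, d, m) (')' :: rest)
            = List.foldl pvStepB (if (0:Int) < a then (a - 1, b, c, d, m + 1) else (a, b, c, d, m)) rest from by
        simp [pvStepB]]
      obtain ⟨Ho, Hc, Hn⟩ := pvInner_spec ')' '(' (by
          intro b hb
          simp [pvOpenings] at hb
          rcases hb with h | h | h | h <;> subst h <;>
            simp [pvOpenings, pvClosings, PySem.List.index?] <;> decide) stack [] count Hs
        (by simp) (by simp)
      by_cases hmem : '(' ∈ stack
      · rw [if_pos (by rw [← h1]; exact_mod_cast List.count_pos_iff.mpr hmem)]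
        apply ih
        refine ⟨Ho, ?_, ?_, ?_, ?_, ?_⟩
        · have hh := Hc '('; simp [hmem] at hh; dsimp only; omega
        · have hh := Hc '{'; simp [hmem] at hh; dsimp only; omega
        · have hh := Hc '['; simp [hmem] at hh; dsimp only; omega
        · have hh := Hc '<'; simp [hmem] at hh; dsimp only; omega
        · dsimp only; rw [Hn, if_pos hmem, h5]
      · have hz : a = 0 := by
          rw [← h1]; simp [List.count_eq_zero_of_not_mem hmem]
        rw [if_neg (by omega)]
        apply ih
        refine ⟨Ho, ?_, ?_, ?_, ?_, ?_⟩
        · have hh := Hc '('; simp [hmem] at hh; dsimp only; omega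
        · have hh := Hc '{'; simp [hmem] at hh; dsimp only; omega
        · have hh := Hc '['; simp [hmem] at hh; dsimp only; omega
        · have hh := Hc '<'; simp [hmem] at hh; dsimp only; omega
        · dsimp only; rw [Hn, if_neg hmem, h5]; omega
    by_cases e6 : s = '}'
    · subst e6
      rw [show pvLoopA ('}' :: rest) stack count
            = pvLoopA rest (pvInner '}' stack [] count).1 (pvInner '}' stack [] count).2 from by
        rw [pvLoopA]; simp [pvOpenings, pvClosings]]
      rw [show List.foldl pvStepB (a, b, c, d, m) ('}' :: rest)
            = List.foldl pvStepB (if (0:Int) < b then (a, b - 1, c, d, m + 1) else (a, b, c, d, m)) rest from by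
        simp [pvStepB]]
      obtain ⟨Ho, Hc, Hn⟩ := pvInner_spec '}' '{' (by
          intro b hb
          simp [pvOpenings] at hb
          rcases hb with h | h | h | h <;> subst h <;>
            simp [pvOpenings, pvClosings, PySem.List.index?] <;> decide) stack [] count Hs
        (by simp) (by simp)
      by_cases hmem : '{' ∈ stack
      · rw [if_pos (by rw [← h2]; exact_mod_cast List.count_pos_iff.mpr hmem)]
        apply ih
        refine ⟨Ho, ?_, ?_, ?_, ?_, ?_⟩
        · have hh := Hc '('; simp [hmem] at hh; dsimp only; omega
        · have hh := Hc '{'; simp [hmem] at hh; dsimp only; omega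
        · have hh := Hc '['; simp [hmem] at hh; dsimp only; omega
        · have hh := Hc '<'; simp [hmem] at hh; dsimp only; omega
        · dsimp only; rw [Hn, if_pos hmem, h5]
      · have hz : b = 0 := by
          rw [← h2]; simp [List.count_eq_zero_of_not_mem hmem]
        rw [if_neg (by omega)]
        apply ih
        refine ⟨Ho, ?_, ?_, ?_, ?_, ?_⟩
        · have hh := Hc '('; simp [hmem] at hh; dsimp only; omega
        · have hh := Hc '{'; simp [hmem] at hh; dsimp only; omega
        · have hh := Hc '['; simp [hmem] at hh; dsimp only; omega
        · have hh := Hc '<'; simp [hmem] at hh; dsimp only; omega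
        · dsimp only; rw [Hn, if_neg hmem, h5]; omega
    by_cases e7 : s = ']'
    · subst e7
      rw [show pvLoopA (']' :: rest) stack count
            = pvLoopA rest (pvInner ']' stack [] count).1 (pvInner ']' stack [] count).2 from by
        rw [pvLoopA]; simp [pvOpenings, pvClosings]]
      rw [show List.foldl pvStepB (a, b, c, d, m) (']' :: rest)
            = List.foldl pvStepB (if (0:Int) < c then (a, b, c - 1, d, m + 1) else (a, b, c, d, m)) rest from by
        simp [pvStepB]]
      obtain ⟨Ho, Hc, Hn⟩ := pvInner_spec ']' '[' (by
          intro b hb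
          simp [pvOpenings] at hb
          rcases hb with h | h | h | h <;> subst h <;>
            simp [pvOpenings, pvClosings, PySem.List.index?] <;> decide) stack [] count Hs
        (by simp) (by simp)
      by_cases hmem : '[' ∈ stack
      · rw [if_pos (by rw [← h3]; exact_mod_cast List.count_pos_iff.mpr hmem)]
        apply ih
        refine ⟨Ho, ?_, ?_, ?_, ?_, ?_⟩
        · have hh := Hc '('; simp [hmem] at hh; dsimp only; omega
        · have hh := Hc '{'; simp [hmem] at hh; dsimp only; omega
        · have hh := Hc '['; simp [hmem] at hh; dsimp only; omega
        · have hh := Hc '<'; simp [hmem] at hh; dsimp only; omega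
        · dsimp only; rw [Hn, if_pos hmem, h5]
      · have hz : c = 0 := by
          rw [← h3]; simp [List.count_eq_zero_of_not_mem hmem]
        rw [if_neg (by omega)]
        apply ih
        refine ⟨Ho, ?_, ?_, ?_, ?_, ?_⟩
        · have hh := Hc '('; simp [hmem] at hh; dsimp only; omega
        · have hh := Hc '{'; simp [hmem] at hh; dsimp only; omega
        · have hh := Hc '['; simp [hmem] at hh; dsimp only; omega
        · have hh := Hc '<'; simp [hmem] at hh; dsimp only; omega
        · dsimp only; rw [Hn, if_neg hmem, h5]; omega
    by_cases e8 : s = '>'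
    · subst e8
      rw [show pvLoopA ('>' :: rest) stack count
            = pvLoopA rest (pvInner '>' stack [] count).1 (pvInner '>' stack [] count).2 from by
        rw [pvLoopA]; simp [pvOpenings, pvClosings]]
      rw [show List.foldl pvStepB (a, b, c, d, m) ('>' :: rest)
            = List.foldl pvStepB (if (0:Int) < d then (a, b, c, d - 1, m + 1) else (a, b, c, d, m)) rest from by
        simp [pvStepB]]
      obtain ⟨Ho, Hc, Hn⟩ := pvInner_spec '>' '<' (by
          intro b hb
          simp [pvOpenings] at hb
          rcases hb with h | h | h | h <;> subst h <;>
            simp [pvOpenings, pvClosings, PySem.List.index?] <;> decide) stack [] count Hs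
        (by simp) (by simp)
      by_cases hmem : '<' ∈ stack
      · rw [if_pos (by rw [← h4]; exact_mod_cast List.count_pos_iff.mpr hmem)]
        apply ih
        refine ⟨Ho, ?_, ?_, ?_, ?_, ?_⟩
        · have hh := Hc '('; simp [hmem] at hh; dsimp only; omega
        · have hh := Hc '{'; simp [hmem] at hh; dsimp only; omega
        · have hh := Hc '['; simp [hmem] at hh; dsimp only; omega
        · have hh := Hc '<'; simp [hmem] at hh; dsimp only; omega
        · dsimp only; rw [Hn, if_pos hmem, h5]
      · have hz : d = 0 := by
          rw [← h4]; simp [List.count_eq_zero_of_not_mem hmem]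
        rw [if_neg (by omega)]
        apply ih
        refine ⟨Ho, ?_, ?_, ?_, ?_, ?_⟩
        · have hh := Hc '('; simp [hmem] at hh; dsimp only; omega
        · have hh := Hc '{'; simp [hmem] at hh; dsimp only; omega
        · have hh := Hc '['; simp [hmem] at hh; dsimp only; omega
        · have hh := Hc '<'; simp [hmem] at hh; dsimp only; omega
        · dsimp only; rw [Hn, if_neg hmem, h5]; omega
    rw [show pvLoopA (s :: rest) stack count = pvLoopA rest stack count from by
      rw [pvLoopA]; simp [pvOpenings, pvClosings, e1, e2, e3, e4, e5, e6, e7, e8]]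
    rw [show List.foldl pvStepB (a, b, c, d, m) (s :: rest)
          = List.foldl pvStepB (a, b, c, d, m) rest from by
      simp [pvStepB, e1, e2, e3, e4, e5, e6, e7, e8]]
    exact ih stack count (a, b, c, d, m) ⟨Hs, h1, h2, h3, h4, h5⟩

lemma solution_eq_alt (s : String) : solution s = solution_alt s := by
  unfold solution solution_alt
  obtain ⟨Ho, h1, h2, h3, h4, h5⟩ :=
    pvLoop_inv s.toList [] 0 (0, 0, 0, 0, 0) ⟨by simp, by simp, by simp, by simp, by simp, rfl⟩
  have hlen := length_eq_counts (pvLoopA s.toList [] 0).1 Ho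
  by_cases he : (pvLoopA s.toList [] 0).1.length = 0
  · rw [if_pos he, if_pos (by omega)]
    omega
  · rw [if_neg he, if_neg (by rintro ⟨z1, z2, z3, z4⟩; omega)]

-- ===== VERDICT (by name: the statement is the Claim_ definition above) =====
theorem solution_spec : Claim_equal_solution := by
  intro s _
  unfold Spec_solution
  exact solution_eq_alt s
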